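-- pv_equiv track=rewrite | github.com/sanjaypadwal91/automotive-ecu-test-framework | pytest_tests/integration/test_brake_controller.py | _count_abs_cycles
-- ===== SOURCE A (Python) =====
-- from typing import Dict, List, Any
--
-- def _count_abs_cycles(abs_active: List[bool]) -> int:
--     """Count ABS cycles from binary signal"""
--     cycles = 0
--     in_cycle = False
--
--     for active in abs_active:
--         if active and not in_cycle:
--             cycles += 1
--             in_cycle = True
--         elif not active:
--             in_cycle = False
--
--     return cycles
-- ===== SOURCE B (Python) =====
-- from typing import Dict, List, Any
--
-- def _run_keys(sig: List[bool]) -> List[bool]: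
--     """Keys of maximal runs of consecutive equal values, in order."""
--     keys = []
--     i = 0
--     n = len(sig)
--     while i < n:
--         k = sig[i]
--         keys.append(k)
--         while i < n and sig[i] == k:
--             i += 1
--     return keys
--
-- def _count_abs_cycles(abs_active: List[bool]) -> int:
--     """Count ABS cycles from binary signal: one cycle per maximal run of active."""
--     return sum(1 for k in _run_keys([bool(a) for a in abs_active]) if k)
-- ===== Notes on version B (the rewrite author's own statement) =====
-- stated objective: alternative
-- what changed: Replaces the in_cycle flag state machine with a run-length grouping: collect the key of each maximal run of equal values, then count the runs whose key is True.
import Mathlib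
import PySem

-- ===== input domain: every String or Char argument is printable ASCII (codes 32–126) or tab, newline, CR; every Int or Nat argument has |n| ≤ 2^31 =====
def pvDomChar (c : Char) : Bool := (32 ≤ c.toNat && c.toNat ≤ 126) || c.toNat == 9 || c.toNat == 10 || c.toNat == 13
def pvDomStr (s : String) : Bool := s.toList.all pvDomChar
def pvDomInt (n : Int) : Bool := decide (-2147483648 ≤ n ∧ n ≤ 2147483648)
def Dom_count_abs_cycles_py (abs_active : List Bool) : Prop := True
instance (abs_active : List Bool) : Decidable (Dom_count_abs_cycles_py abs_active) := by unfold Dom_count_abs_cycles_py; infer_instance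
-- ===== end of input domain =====

-- B replaces A's in_cycle state machine by grouping the signal into maximal runs
-- of equal values and counting the runs whose key is true (one cycle per active run).

-- B replaces A's in_cycle state machine by grouping the signal into maximal runs
-- of equal values and counting the runs whose key is true (one cycle per active run).

-- ===== PORT A =====
-- the for-loop of A, state (cycles, in_cycle), branches in source order
def pvLoopA : List Bool → Int → Bool → Int
  | [], cycles, _ => cycles
  | active :: rest, cycles, in_cycle =>
    if active && !in_cycle then pvLoopA rest (cycles + 1) true
    else if !active then pvLoopA rest cycles false
    else pvLoopA rest cycles in_cycle

def count_abs_cycles_py (abs_active : List Bool) : Int :=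
  pvLoopA abs_active 0 false

-- ===== PORT B =====
-- _run_keys: key of each maximal run of consecutive equal values, in order
def pvRunKeys : List Bool → List Bool
  | [] => []
  | k :: rest => k :: pvRunKeys (rest.dropWhile (fun y => y = k))
termination_by xs => xs.length
decreasing_by
  simp only [List.length_cons]
  exact Nat.lt_succ_of_le (List.length_dropWhile_le _ _)

def count_abs_cycles_py_alt (abs_active : List Bool) : Int :=
  ((pvRunKeys abs_active).filter (fun k => k)).length

-- ===== PRECONDITION & SPEC =====
def Spec_count_abs_cycles_py (abs_active : List Bool) (out : Int) : Prop := out = count_abs_cycles_py_alt abs_active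
instance (abs_active : List Bool) (out : Int) : Decidable (Spec_count_abs_cycles_py abs_active out) := by unfold Spec_count_abs_cycles_py; infer_instance

-- ===== CLAIM (what is proved, stated in full; the proofs are below) =====
def Claim_equal_count_abs_cycles_py : Prop := ∀ (abs_active : List Bool), Dom_count_abs_cycles_py abs_active → Spec_count_abs_cycles_py abs_active (count_abs_cycles_py abs_active)

-- ===== LEMMAS AND PROOFS =====
theorem pvRunKeys_nil : pvRunKeys [] = [] := by rw [pvRunKeys.eq_def]

theorem pvRunKeys_cons (k : Bool) (rest : List Bool) :
    pvRunKeys (k :: rest) = k :: pvRunKeys (rest.dropWhile (fun y => y = k)) := by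
  rw [pvRunKeys.eq_def]

theorem alt_nil : count_abs_cycles_py_alt [] = 0 := by
  simp [count_abs_cycles_py_alt, pvRunKeys_nil]

theorem alt_cons_true (rest : List Bool) :
    count_abs_cycles_py_alt (true :: rest) =
      1 + count_abs_cycles_py_alt (rest.dropWhile (fun y => y = true)) := by
  simp only [count_abs_cycles_py_alt, pvRunKeys_cons, List.filter, List.length_cons]
  push_cast
  ring

theorem alt_cons_false (rest : List Bool) :
    count_abs_cycles_py_alt (false :: rest) =
      count_abs_cycles_py_alt (rest.dropWhile (fun y => y = false)) := by
  simp only [count_abs_cycles_py_alt, pvRunKeys_cons, List.filter]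

-- loop invariant: the remaining loop computes the run count of the signal after
-- dropping the leading run of the current state's value
theorem pvLoopA_eq (xs : List Bool) : ∀ (c : Int) (b : Bool),
    pvLoopA xs c b = c + count_abs_cycles_py_alt (xs.dropWhile (fun y => y = b)) := by
  induction xs with
  | nil => intro c b; simp [pvLoopA, alt_nil]
  | cons a rest ih =>
    intro c b
    cases a <;> cases b <;>
      simp [pvLoopA, ih, alt_cons_true, alt_cons_false] <;> ring

theorem dropWhile_false_alt (xs : List Bool) :
    count_abs_cycles_py_alt (xs.dropWhile (fun y => y = false)) =
    count_abs_cycles_py_alt xs := by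
  cases xs with
  | nil => rfl
  | cons a rest =>
    cases a with
    | false =>
      simp only [List.dropWhile_cons, decide_true, if_true, alt_cons_false]
    | true => simp

-- ===== VERDICT (by name: the statement is the Claim_ definition above) =====
theorem count_abs_cycles_py_spec : Claim_equal_count_abs_cycles_py := by
  intro xs _
  unfold Spec_count_abs_cycles_py count_abs_cycles_py
  rw [pvLoopA_eq, dropWhile_false_alt]
  ring
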